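-- pv_equiv track=rewrite | github.com/antongenchev/PyPainter | src/Layers/LayersCache.py | insert_missing_layers
-- ===== SOURCE A (Python) =====
-- from typing import Tuple, List, Any, Generator
--
-- def insert_missing_layers(t: Tuple[int], l: List[Tuple[int]]) -> List[Tuple[int]]:
--     """
--     Given a tuple (a0,...,an) with {ai} ascending and a list of disjoint
--     tuples [(ak,...,a(k+l)),...] with k, k+l in 0,...,n fill the missing
--     integers in the list using singleton tuples.
--
--     Args:
--         t (Tuple[int]): A tuple with ascending integers
--         l (List[Tuple[int]])): A list of tuples such that the numbers in
--             each tuple are ascending and the last number of any tuple is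
--             less than the first number of the next tuple.
--     Returns:
--         List[Tuple[int]]: The same as the list `l` but with gaps
--             filled by singleton tuples. So that any integer found in t
--             is also found in the result.
--     Example:
--         >>> t = (1, 2, 4, 8, 16)
--         >>> l = [(1, 2), (8, 16)]
--         >>> insert_missing_layers(t, l)
--         [(1, 2), (4,), (8, 16)]
--     """
--     result = []
--     i = 0  # pointer for t
--
--     for group in l:
--         while i < len(t) and t[i] < group[0]:
--             # Add integers that should be before the tuple.
--             result.append((t[i],))
--             i += 1
--
--         # Check that the sequence from the group matches the tuple
--         group_len = len(group)
--         if t[i:i+group_len] == group: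
--             result.append(group)
--             i += group_len
--         else:
--             raise ValueError
--
--     # Append remaining integers at the end
--     while i < len(t):
--         result.append((t[i],))
--         i += 1
--
--     return result
-- ===== SOURCE B (Python) =====
-- def insert_missing_layers(t, l):
--     """Single left-to-right scan of t against a queue of the groups:
--     when the current element starts the next pending group, emit that whole
--     group and jump past it; otherwise emit a singleton."""
--     queue = list(l)
--     result = []
--     i, n = 0, len(t)
--     while i < n:
--         if queue and queue[0] and t[i] == queue[0][0]:
--             group = queue.pop(0)
--             if tuple(t[i:i + len(group)]) != tuple(group):
--                 raise ValueError
--             result.append(group)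
--             i += len(group)
--         else:
--             result.append((t[i],))
--             i += 1
--     if queue:
--         raise ValueError
--     return result
-- ===== Notes on version B (the rewrite author's own statement) =====
-- stated objective: alternative
-- what changed: A loops over the groups, each iteration running an inner skip-while over t plus a trailing while; B makes a single scan over t against a queue of pending groups, emitting a whole group when its first element is reached and a singleton otherwise.
-- outside the precondition, e.g. on insert_missing_layers((), [()]): A returns [()], B raises ValueError; on insert_missing_layers((4, 6), [(4, 6), ()]): A returns [(4, 6), ()], B raises ValueError
import Mathlib
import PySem

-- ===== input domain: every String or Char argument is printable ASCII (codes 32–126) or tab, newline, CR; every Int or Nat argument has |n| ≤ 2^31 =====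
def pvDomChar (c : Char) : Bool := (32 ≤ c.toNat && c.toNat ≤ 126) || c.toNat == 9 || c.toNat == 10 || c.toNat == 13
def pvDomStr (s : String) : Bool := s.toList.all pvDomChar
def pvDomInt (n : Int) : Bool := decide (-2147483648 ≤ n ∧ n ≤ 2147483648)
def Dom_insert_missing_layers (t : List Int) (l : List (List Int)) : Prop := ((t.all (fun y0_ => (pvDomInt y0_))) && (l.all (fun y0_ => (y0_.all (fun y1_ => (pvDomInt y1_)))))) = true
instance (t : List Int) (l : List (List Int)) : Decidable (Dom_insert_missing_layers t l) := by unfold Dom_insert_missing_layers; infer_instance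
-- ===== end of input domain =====

-- B replaces A's per-group loop with skip/match/tail phases by one scan of t against a queue of pending groups (objective: alternative; return value only).


-- ===== PORT A =====
-- inner while: `while i < len(t) and t[i] < group[0]` (group[0] on empty group = IndexError → none)
def pvSkipA (t : List Int) (g : List Int) (i : Nat) (res : List (List Int)) :
    Option (Nat × List (List Int)) :=
  if i < t.length then
    match g with
    | [] => none
    | g0 :: _ =>
      if t.getD i 0 < g0 then pvSkipA t g (i + 1) (res ++ [[t.getD i 0]]) else some (i, res)
  else some (i, res)
termination_by t.length - i

-- `for group in l:` with the slice check; none = raise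
def pvLoopA (t : List Int) : List (List Int) → Nat → List (List Int) →
    Option (Nat × List (List Int))
  | [], i, res => some (i, res)
  | g :: rest, i, res =>
    match pvSkipA t g i res with
    | none => none
    | some (i', res') =>
      if PySem.List.slice t (some (i' : Int)) (some ((i' : Int) + (g.length : Int))) = g then
        pvLoopA t rest (i' + g.length) (res' ++ [g])
      else none

-- trailing `while i < len(t)`
def pvTailA (t : List Int) (i : Nat) (res : List (List Int)) : List (List Int) :=
  if i < t.length then pvTailA t (i + 1) (res ++ [[t.getD i 0]]) else res
termination_by t.length - i

def insert_missing_layers (t : List Int) (l : List (List Int)) : List (List Int) :=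
  match pvLoopA t l 0 [] with
  | some (i, res) => pvTailA t i res
  | none => []  -- the raise branches; excluded by Pre_

-- ===== PORT B =====
-- single scan of t: when t[i] starts the next pending group, emit the group and jump, else a singleton
def pvScanB (t : List Int) (i : Nat) (queue res : List (List Int)) :
    Option (List (List Int)) :=
  if i < t.length then
    match queue with
    | (g0 :: gs) :: qrest =>
      if t.getD i 0 = g0 then
        if PySem.List.slice t (some (i : Int)) (some ((i : Int) + ((g0 :: gs).length : Int)))
            = g0 :: gs then
          pvScanB t (i + (g0 :: gs).length) qrest (res ++ [g0 :: gs])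
        else none
      else pvScanB t (i + 1) queue (res ++ [[t.getD i 0]])
    | _ => pvScanB t (i + 1) queue (res ++ [[t.getD i 0]])
  else if queue.isEmpty then some res else none
termination_by t.length - i


def insert_missing_layers_alt (t : List Int) (l : List (List Int)) : List (List Int) :=
  (pvScanB t 0 l []).getD []  -- none = raise ValueError; excluded by Pre_

-- ===== PRECONDITION & SPEC =====
-- Closed-form "A returns" condition: t decomposes, group by group, as (elements < group[0]) ++ group ++ rest.
-- Pre_ also excludes inputs whose l contains an EMPTY group: there A either raises IndexError or (with t
-- exhausted) accidentally returns stray empty tuples — a degenerate input outside the documented domain,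
-- on which B raises ValueError.
def pvPre : List Int → List (List Int) → Bool
  | _, [] => true
  | t, g :: rest =>
    match g with
    | [] => false
    | g0 :: _ =>
      let x := t.takeWhile (fun a => a < g0)
      ((t.drop x.length).take g.length == g) && pvPre ((t.drop x.length).drop g.length) rest

def Pre_insert_missing_layers (t : List Int) (l : List (List Int)) : Prop := pvPre t l = true
instance (t : List Int) (l : List (List Int)) : Decidable (Pre_insert_missing_layers t l) := by
  unfold Pre_insert_missing_layers; infer_instance

def pvWitness_insert_missing_layers : List Int × List (List Int) :=
  ([1, 2, 4, 8, 16], [[1, 2], [8, 16]])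

def Spec_insert_missing_layers (t : List Int) (l : List (List Int)) (out : List (List Int)) : Prop := out = insert_missing_layers_alt t l
instance (t : List Int) (l : List (List Int)) (out : List (List Int)) : Decidable (Spec_insert_missing_layers t l out) := by unfold Spec_insert_missing_layers; infer_instance

-- ===== CLAIM (what is proved, stated in full; the proofs are below) =====
def Claim_equal_insert_missing_layers : Prop := ∀ (t : List Int) (l : List (List Int)), Dom_insert_missing_layers t l → Pre_insert_missing_layers t l → Spec_insert_missing_layers t l (insert_missing_layers t l)

-- ===== LEMMAS AND PROOFS =====

-- reference result both ports are reduced to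
def pvCanon : List Int → List (List Int) → List (List Int)
  | t, [] => t.map (fun a => [a])
  | t, g :: rest =>
    match g with
    | [] => []
    | g0 :: _ =>
      let x := t.takeWhile (fun a => a < g0)
      x.map (fun a => [a]) ++ g :: pvCanon ((t.drop x.length).drop g.length) rest

theorem pvGetD_drop (t : List Int) (i : Nat) (a : Int) (d : List Int)
    (h : t.drop i = a :: d) : t.getD i 0 = a ∧ t.drop (i + 1) = d := by
  constructor
  · have h0 : t[i]? = some a := by
      have : (t.drop i)[0]? = t[i + 0]? := List.getElem?_drop
      simp [h] at this; simpa using this.symm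
    simp [List.getD, h0]
  · have h1 : t.drop (i + 1) = (t.drop i).drop 1 := by rw [List.drop_drop]
    simp [h1, h]

theorem pvSkipA_spec (t : List Int) (g0 : Int) (gs : List Int) :
    ∀ i res, pvSkipA t (g0 :: gs) i res =
      some (i + ((t.drop i).takeWhile (fun a => a < g0)).length,
            res ++ ((t.drop i).takeWhile (fun a => a < g0)).map (fun a => [a])) := by
  have key : ∀ n i res, t.length - i ≤ n → pvSkipA t (g0 :: gs) i res =
      some (i + ((t.drop i).takeWhile (fun a => a < g0)).length,
            res ++ ((t.drop i).takeWhile (fun a => a < g0)).map (fun a => [a])) := by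
    intro n
    induction n with
    | zero =>
      intro i res hn
      have hge : ¬ i < t.length := by omega
      have hd : t.drop i = [] := List.drop_eq_nil_of_le (by omega)
      rw [pvSkipA]; simp [hge, hd]
    | succ n ih =>
      intro i res hn
      by_cases hlt : i < t.length
      · cases hd : t.drop i with
        | nil => exfalso; have := List.drop_eq_nil_iff.mp hd; omega
        | cons a d =>
          obtain ⟨hga, hdd⟩ := pvGetD_drop t i a d hd
          have hgi : t[i] = a := by rw [← hga, List.getD_eq_getElem t 0 hlt]
          rw [pvSkipA]
          by_cases hcmp : a < g0
          · have hrec := ih (i + 1) (res ++ [[a]]) (by omega)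
            rw [hdd] at hrec
            simp only [hlt, hga, hcmp, if_pos, hrec]
            simp [hcmp]
            omega
          · simp [hlt, hgi, hcmp]
      · have hd : t.drop i = [] := List.drop_eq_nil_of_le (by omega)
        rw [pvSkipA]; simp [hlt, hd]
  intro i res; exact key (t.length - i) i res le_rfl

theorem pvTailA_spec (t : List Int) :
    ∀ i res, pvTailA t i res = res ++ (t.drop i).map (fun a => [a]) := by
  have key : ∀ n i res, t.length - i ≤ n →
      pvTailA t i res = res ++ (t.drop i).map (fun a => [a]) := by
    intro n
    induction n with
    | zero =>
      intro i res hn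
      have hge : ¬ i < t.length := by omega
      have hd : t.drop i = [] := List.drop_eq_nil_of_le (by omega)
      rw [pvTailA]; simp [hge, hd]
    | succ n ih =>
      intro i res hn
      by_cases hlt : i < t.length
      · cases hd : t.drop i with
        | nil => exfalso; have := List.drop_eq_nil_iff.mp hd; omega
        | cons a d =>
          obtain ⟨hga, hdd⟩ := pvGetD_drop t i a d hd
          have hrec := ih (i + 1) (res ++ [[a]]) (by omega)
          rw [hdd] at hrec
          have hgi : t[i] = a := by rw [← hga, List.getD_eq_getElem t 0 hlt]
          rw [pvTailA]
          simp [hlt, hgi, hrec]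
      · have hd : t.drop i = [] := List.drop_eq_nil_of_le (by omega)
        rw [pvTailA]; simp [hlt, hd]
  intro i res; exact key (t.length - i) i res le_rfl

theorem pvScanB_stop (t : List Int) (i : Nat) (q res : List (List Int))
    (h : ¬ i < t.length) :
    pvScanB t i q res = if q.isEmpty then some res else none := by
  rw [pvScanB.eq_def, if_neg h]

theorem pvScanB_skip (t : List Int) (i : Nat) (q res : List (List Int))
    (h : i < t.length)
    (hq : ∀ g0 gs qrest, q = (g0 :: gs) :: qrest → ¬ t.getD i 0 = g0) :
    pvScanB t i q res = pvScanB t (i + 1) q (res ++ [[t.getD i 0]]) := by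
  rw [pvScanB.eq_def, if_pos h]
  split
  · rename_i g0 gs qrest
    rw [if_neg (hq g0 gs qrest rfl)]
  · rfl

theorem pvScanB_hit (t : List Int) (i : Nat) (g0 : Int) (gs : List Int)
    (qrest res : List (List Int)) (h : i < t.length) (he : t.getD i 0 = g0)
    (hs : PySem.List.slice t (some (i : Int)) (some ((i : Int) + ((g0 :: gs).length : Int)))
      = g0 :: gs) :
    pvScanB t i ((g0 :: gs) :: qrest) res
      = pvScanB t (i + (g0 :: gs).length) qrest (res ++ [g0 :: gs]) := by
  rw [pvScanB.eq_def, if_pos h]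
  simp only [he, hs, reduceIte]

theorem pvLoopA_spec (t : List Int) :
    ∀ (l : List (List Int)) (i : Nat) (res : List (List Int)),
      pvPre (t.drop i) l = true →
      (match pvLoopA t l i res with
       | some (i', res') => pvTailA t i' res'
       | none => []) = res ++ pvCanon (t.drop i) l := by
  intro l
  induction l with
  | nil =>
    intro i res _
    rw [pvLoopA]
    simp [pvTailA_spec, pvCanon]
  | cons g rest ih =>
    intro i res hpre
    match g with
    | [] => simp [pvPre] at hpre
    | g0 :: gs =>
      rw [pvPre] at hpre
      simp only [Bool.and_eq_true, beq_iff_eq] at hpre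
      obtain ⟨h1, h2⟩ := hpre
      rw [pvLoopA, pvSkipA_spec]
      have hdd : t.drop (i + ((t.drop i).takeWhile (fun a => a < g0)).length)
          = (t.drop i).drop ((t.drop i).takeWhile (fun a => a < g0)).length := by
        rw [List.drop_drop]
      have hslice : PySem.List.slice t
          (some ((i + ((t.drop i).takeWhile (fun a => a < g0)).length : Nat) : Int))
          (some (((i + ((t.drop i).takeWhile (fun a => a < g0)).length : Nat) : Int)
            + ((g0 :: gs).length : Int))) = g0 :: gs := by
        rw [PySem.List.slice_natCast_add, hdd, h1]
      simp only [hslice, reduceIte]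
      have hdd2 : t.drop (i + ((t.drop i).takeWhile (fun a => a < g0)).length
            + (g0 :: gs).length)
          = ((t.drop i).drop ((t.drop i).takeWhile (fun a => a < g0)).length).drop
              (g0 :: gs).length := by
        rw [List.drop_drop, List.drop_drop, Nat.add_assoc]
      have hrec := ih (i + ((t.drop i).takeWhile (fun a => a < g0)).length + (g0 :: gs).length)
        (res ++ ((t.drop i).takeWhile (fun a => a < g0)).map (fun a => [a]) ++ [g0 :: gs])
        (by rw [hdd2]; exact h2)
      rw [hrec, hdd2]
      conv_rhs => rw [pvCanon]
      simp

theorem pvScanB_spec (t : List Int) :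
    ∀ (n : Nat) (i : Nat), t.length - i ≤ n →
      ∀ (l : List (List Int)) (res : List (List Int)),
        pvPre (t.drop i) l = true →
        pvScanB t i l res = some (res ++ pvCanon (t.drop i) l) := by
  intro n
  induction n with
  | zero =>
    intro i hn l res hpre
    have hge : ¬ i < t.length := by omega
    have hd : t.drop i = [] := List.drop_eq_nil_of_le (by omega)
    rw [hd] at hpre
    match l with
    | [] => rw [pvScanB_stop t i [] res hge]; simp [hd, pvCanon]
    | [] :: rest => simp [pvPre] at hpre
    | (g0 :: gs) :: rest => simp [pvPre] at hpre
  | succ n ih =>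
    intro i hn l res hpre
    by_cases hlt : i < t.length
    · cases hd : t.drop i with
      | nil => exfalso; have := List.drop_eq_nil_iff.mp hd; omega
      | cons a d =>
        obtain ⟨hga, hdd⟩ := pvGetD_drop t i a d hd
        rw [hd] at hpre
        match l with
        | [] =>
          rw [pvScanB_skip t i [] res hlt (by intro _ _ _ h; cases h)]
          have hrec := ih (i + 1) (by omega) [] (res ++ [[t.getD i 0]]) (by simp [pvPre])
          rw [hrec, hdd, hga]
          simp [pvCanon]
        | [] :: rest => simp [pvPre] at hpre
        | (g0 :: gs) :: rest =>
          rw [pvPre] at hpre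
          simp only [Bool.and_eq_true, beq_iff_eq] at hpre
          obtain ⟨h1, h2⟩ := hpre
          by_cases hcmp : a < g0
          · -- current element still below the group head: singleton step
            have hne : ¬ t.getD i 0 = g0 := by rw [hga]; omega
            have htw : (a :: d).takeWhile (fun x => x < g0)
                = a :: d.takeWhile (fun x => x < g0) := by simp [hcmp]
            rw [htw] at h1 h2
            have hpre' : pvPre (t.drop (i + 1)) ((g0 :: gs) :: rest) = true := by
              rw [hdd, pvPre]
              simp only [Bool.and_eq_true, beq_iff_eq]
              exact ⟨by simpa using h1, by simpa using h2⟩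
            have hrec := ih (i + 1) (by omega) ((g0 :: gs) :: rest)
              (res ++ [[t.getD i 0]]) hpre'
            rw [pvScanB_skip t i _ res hlt (by intro _ _ _ h; cases h; exact hne)]
            rw [hrec, hdd, hga]
            conv_rhs => rw [pvCanon]
            rw [pvCanon]
            simp [htw]
          · -- group starts here
            have htw : (a :: d).takeWhile (fun x => x < g0) = [] := by simp [hcmp]
            rw [htw] at h1 h2
            simp only [List.length_nil, List.drop_zero] at h1 h2
            have hag : t.getD i 0 = g0 := by
              rw [hga]
              have := congrArg (fun xs => xs.headD 0) h1
              simpa using this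
            have hslice : PySem.List.slice t (some ((i : Nat) : Int))
                (some (((i : Nat) : Int) + ((g0 :: gs).length : Int))) = g0 :: gs := by
              have : PySem.List.slice t (some ((i : Nat) : Int))
                  (some (((i : Nat) : Int) + ((g0 :: gs).length : Int)))
                  = (t.drop i).take (g0 :: gs).length := PySem.List.slice_natCast_add t i _
              rw [this, hd, h1]
            have hdrop2 : t.drop (i + (g0 :: gs).length) = (a :: d).drop (g0 :: gs).length := by
              rw [← hd, List.drop_drop]
            have hrec := ih (i + (g0 :: gs).length)
              (by simp; omega) rest (res ++ [g0 :: gs])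
              (by rw [hdrop2]; exact h2)
            rw [pvScanB_hit t i g0 gs rest res hlt hag hslice]
            rw [hrec, hdrop2]
            conv_rhs => rw [pvCanon]
            simp [htw]
    · have hd : t.drop i = [] := List.drop_eq_nil_of_le (by omega)
      rw [hd] at hpre
      match l with
      | [] => rw [pvScanB_stop t i [] res hlt]; simp [hd, pvCanon]
      | [] :: rest => simp [pvPre] at hpre
      | (g0 :: gs) :: rest => simp [pvPre] at hpre

-- ===== VERDICT (by name: the statement is the Claim_ definition above) =====
theorem insert_missing_layers_spec : Claim_equal_insert_missing_layers := by
  intro t l _ hpre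
  unfold Spec_insert_missing_layers insert_missing_layers insert_missing_layers_alt
  have hA := pvLoopA_spec t l 0 [] (by simpa using hpre)
  have hB := pvScanB_spec t t.length 0 (by omega) l [] (by simpa using hpre)
  simp only [List.drop_zero] at hA hB
  rw [hB]
  simpa using hA
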